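-- pv_equiv track=rewrite | github.com/spa5k/Leetcode | 1614-maximum-nesting-depth-of-the-parentheses/1614-maximum-nesting-depth-of-the-parentheses.py | maxDepth
-- ===== SOURCE A (Python) =====
-- def maxDepth(s: str) -> int:
--     l_count = 0
--     max_depth = 0
--
--     for i in s:
--         if i == "(":
--             l_count += 1
--         elif i == ")":
--             l_count -= 1
--
--         max_depth = max(l_count, max_depth)
--     return max_depth
-- ===== SOURCE B (Python) =====
-- def maxDepth(s: str) -> int:
--     # Divide and conquer: each piece yields (balance, max prefix-balance incl. the
--     # empty prefix); halves combine as (b1+b2, max(m1, b1+m2)).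
--     def solve(t):
--         if len(t) == 0:
--             return (0, 0)
--         if len(t) == 1:
--             d = 1 if t == "(" else -1 if t == ")" else 0
--             return (d, max(d, 0))
--         mid = len(t) // 2
--         b1, m1 = solve(t[:mid])
--         b2, m2 = solve(t[mid:])
--         return (b1 + b2, max(m1, b1 + m2))
--     return solve(s)[1]
-- ===== Notes on version B (the rewrite author's own statement) =====
-- stated objective: alternative
-- what changed: B replaces A's single linear scan with inline max by a divide-and-conquer recursion: each half of the string is summarised as a (balance, max-prefix-balance) pair and the pairs are combined with (b1+b2, max(m1, b1+m2)).
import Mathlib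
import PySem

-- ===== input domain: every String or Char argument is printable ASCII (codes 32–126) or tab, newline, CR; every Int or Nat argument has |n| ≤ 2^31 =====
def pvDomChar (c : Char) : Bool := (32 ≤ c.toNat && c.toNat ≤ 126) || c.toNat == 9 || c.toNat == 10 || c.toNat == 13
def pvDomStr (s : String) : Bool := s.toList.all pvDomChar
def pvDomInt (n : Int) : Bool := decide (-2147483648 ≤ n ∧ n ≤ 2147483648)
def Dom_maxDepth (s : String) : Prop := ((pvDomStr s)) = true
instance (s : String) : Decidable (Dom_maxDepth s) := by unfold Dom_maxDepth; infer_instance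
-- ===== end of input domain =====

-- B computes the same value by divide and conquer (combine (balance, max-prefix) pairs of halves)
-- instead of A's single linear scan with an inline max (alternative algorithm, not faster).

-- ===== PORT A =====
-- A's loop: state (l_count, max_depth), updated per character in order.
def pvGoA : List Char → Int → Int → Int
  | [], _, m => m
  | c :: cs, l, m =>
    let l' := if c = '(' then l + 1 else if c = ')' then l - 1 else l
    pvGoA cs l' (max l' m)

def maxDepth (s : String) : Int := pvGoA s.toList 0 0

-- ===== PORT B =====
def pvDeltaC (c : Char) : Int := if c = '(' then 1 else if c = ')' then -1 else 0

-- Source B's combine step: return (b1 + b2, max(m1, b1 + m2)).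
def pvCombine (p q : Int × Int) : Int × Int := (p.1 + q.1, max p.2 (p.1 + q.2))

-- Source B's solve: (balance, max prefix-balance including the empty prefix) of a piece.
def pvSolve : List Char → Int × Int
  | [] => (0, 0)
  | [c] => (pvDeltaC c, max (pvDeltaC c) 0)
  | c₁ :: c₂ :: rest =>
    pvCombine (pvSolve ((c₁ :: c₂ :: rest).take ((c₁ :: c₂ :: rest).length / 2)))
              (pvSolve ((c₁ :: c₂ :: rest).drop ((c₁ :: c₂ :: rest).length / 2)))
termination_by t => t.length
decreasing_by
  · simp [List.length_take]; omega
  · simp; omega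

def maxDepth_alt (s : String) : Int := (pvSolve s.toList).2

-- ===== PRECONDITION & SPEC =====
def Spec_maxDepth (s : String) (out : Int) : Prop := out = maxDepth_alt s
instance (s : String) (out : Int) : Decidable (Spec_maxDepth s out) := by unfold Spec_maxDepth; infer_instance

-- ===== CLAIM (what is proved, stated in full; the proofs are below) =====
def Claim_equal_maxDepth : Prop := ∀ (s : String), Dom_maxDepth s → Spec_maxDepth s (maxDepth s)

-- ===== LEMMAS AND PROOFS =====

-- Reference functions: balance of a piece, and max of its prefix balances (incl. the empty prefix).
def pvBal : List Char → Int
  | [] => 0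
  | c :: cs => pvDeltaC c + pvBal cs

def pvM : List Char → Int
  | [] => 0
  | c :: cs => max 0 (pvDeltaC c + pvM cs)

theorem pvM_nonneg (l : List Char) : 0 ≤ pvM l := by
  cases l <;> simp [pvM]

theorem pvBal_append (u v : List Char) : pvBal (u ++ v) = pvBal u + pvBal v := by
  induction u with
  | nil => simp [pvBal]
  | cons c cs ih => simp [pvBal, ih]; ring

theorem pvM_append (u v : List Char) : pvM (u ++ v) = max (pvM u) (pvBal u + pvM v) := by
  induction u with
  | nil => have := pvM_nonneg v; simp [pvM, pvBal]; omega
  | cons c cs ih => simp [pvM, pvBal, ih]; omega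

-- B's recursion computes exactly (pvBal, pvM).
theorem pvSolve_eq (t : List Char) : pvSolve t = (pvBal t, pvM t) := by
  fun_induction pvSolve with
  | case1 => simp [pvBal, pvM]
  | case2 c => simp [pvBal, pvM]; omega
  | case3 c₁ c₂ rest ih1 ih2 =>
    rw [ih1, ih2]
    have h := List.take_append_drop ((c₁ :: c₂ :: rest).length / 2) (c₁ :: c₂ :: rest)
    conv_rhs => rw [← h, pvBal_append, pvM_append]
    rfl

-- A's step equals the delta function.
theorem pvStep_eq (l : Int) (c : Char) :
    (if c = '(' then l + 1 else if c = ')' then l - 1 else l) = l + pvDeltaC c := by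
  unfold pvDeltaC
  by_cases h1 : c = '(' <;> by_cases h2 : c = ')' <;> simp [h1, h2] <;> try omega

-- Loop invariant for A: with l ≤ m, the loop returns max m (l + pvM cs).
theorem pvGoA_eq (cs : List Char) (l m : Int) (h : l ≤ m) :
    pvGoA cs l m = max m (l + pvM cs) := by
  induction cs generalizing l m with
  | nil => simp [pvGoA, pvM]; omega
  | cons c cs ih =>
    simp only [pvGoA, pvStep_eq, pvM]
    rw [ih (l + pvDeltaC c) (max (l + pvDeltaC c) m) (le_max_left _ _)]
    have := pvM_nonneg cs
    omega

-- ===== VERDICT (by name: the statement is the Claim_ definition above) =====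
theorem maxDepth_spec : Claim_equal_maxDepth := by
  intro s _
  unfold Spec_maxDepth maxDepth maxDepth_alt
  rw [pvGoA_eq _ 0 0 le_rfl, pvSolve_eq]
  have := pvM_nonneg s.toList
  simp; omega
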